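-- pv_equiv track=rewrite | github.com/compose-lang/compiler | opcodes/generate_instructions.py | rejoin_size_parts
-- ===== SOURCE A (Python) =====
-- def rejoin_size_parts(parts: [str]) -> [str]:
--     result = []
--     skip = set()
--     for i in range(0, len(parts)):
--         part = parts[i]
--         if part[0] == 'K':
--             next = i
--             while part[-1] != '}':
--                 next = next + 1
--                 part = part + "\\" + parts[next]
--                 skip.add(next)
--         if i not in skip:
--             result.append(part)
--     return result
-- ===== SOURCE B (Python) =====
-- def rejoin_size_parts(parts: [str]) -> [str]:
--     result = []
--     i = 0
--     n = len(parts)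
--     while i < n:
--         part = parts[i]
--         if part[0] == 'K':
--             while part[-1] != '}':
--                 i = i + 1
--                 part = part + "\\" + parts[i]
--         result.append(part)
--         i = i + 1
--     return result
-- ===== Notes on version B (the rewrite author's own statement) =====
-- stated objective: simpler
-- what changed: Replaced the range-loop with a skip set and a post-hoc 'i not in skip' filter by a single while-loop over an explicit index that consumes each 'K' group in place and jumps past it, so no skip bookkeeping or re-scanning of consumed parts remains.
import Mathlib
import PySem

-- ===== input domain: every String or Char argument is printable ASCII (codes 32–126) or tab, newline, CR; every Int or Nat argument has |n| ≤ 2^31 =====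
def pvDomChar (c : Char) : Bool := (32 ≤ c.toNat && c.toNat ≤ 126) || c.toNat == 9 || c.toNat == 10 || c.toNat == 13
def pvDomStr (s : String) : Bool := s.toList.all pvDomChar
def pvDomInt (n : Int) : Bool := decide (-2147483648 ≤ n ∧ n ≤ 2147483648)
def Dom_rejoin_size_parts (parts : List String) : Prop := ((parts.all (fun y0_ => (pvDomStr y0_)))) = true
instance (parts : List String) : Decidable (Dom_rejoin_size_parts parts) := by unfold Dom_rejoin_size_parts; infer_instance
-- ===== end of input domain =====

-- B replaces A's range-loop + skip set + 'i not in skip' filter by one while-loop over an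
-- explicit index that consumes each 'K' group in place and jumps past it (objective: simpler).

-- ===== PORT A =====
-- the inner 'while part[-1] != "}"' loop; fuel bounds the steps (parts.length is always enough
-- where Python terminates); the 'none' branch is Python's IndexError, excluded by Pre_
def pvAInner (parts : List String) (part : String) (next : Int) (skip : PySem.Set Int) :
    Nat → String × Int × PySem.Set Int
  | 0 => (part, next, skip)
  | fuel + 1 =>
    if PySem.Str.pyGet? part (-1) ≠ some '}' then
      match PySem.List.pyGet? parts (next + 1) with
      | none => (part, next + 1, skip)
      | some p => pvAInner parts (part ++ "\\" ++ p) (next + 1) (PySem.Set.add skip (next + 1)) fuel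
    else (part, next, skip)

-- one iteration of 'for i in range(0, len(parts))'; state = (result, skip)
def pvAStep (parts : List String) (acc : List String × PySem.Set Int) (i : Int) :
    List String × PySem.Set Int :=
  match PySem.List.pyGet? parts i with
  | none => acc   -- unreachable: i comes from range(0, len(parts))
  | some part0 =>
    let ps :=
      if PySem.Str.pyGet? part0 0 = some 'K' then
        let r := pvAInner parts part0 i acc.2 parts.length
        (r.1, r.2.2)
      else (part0, acc.2)
    (if PySem.Set.contains ps.2 i then acc.1 else acc.1 ++ [ps.1], ps.2)

def rejoin_size_parts (parts : List String) : List String :=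
  ((PySem.List.pyRange 0 parts.length 1).foldl (pvAStep parts) ([], PySem.Set.empty)).1

-- ===== PORT B =====
-- the same inner while-loop of Source B, without the skip set: returns (joined part, final i)
def pvBGroup (parts : List String) (part : String) (i : Int) : Nat → String × Int
  | 0 => (part, i)
  | fuel + 1 =>
    if PySem.Str.pyGet? part (-1) ≠ some '}' then
      match PySem.List.pyGet? parts (i + 1) with
      | none => (part, i + 1)
      | some p => pvBGroup parts (part ++ "\\" ++ p) (i + 1) fuel
    else (part, i)

-- 'while i < n': i strictly increases each iteration, so fuel = parts.length always suffices
def pvBLoop (parts : List String) (i : Int) (result : List String) : Nat → List String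
  | 0 => result
  | fuel + 1 =>
    if i < (parts.length : Int) then
      match PySem.List.pyGet? parts i with
      | none => result   -- Python's IndexError on parts[i] with an empty string is excluded by Pre_
      | some part0 =>
        if PySem.Str.pyGet? part0 0 = some 'K' then
          let g := pvBGroup parts part0 i parts.length
          pvBLoop parts (g.2 + 1) (result ++ [g.1]) fuel
        else
          pvBLoop parts (i + 1) (result ++ [part0]) fuel
    else result

def rejoin_size_parts_alt (parts : List String) : List String :=
  pvBLoop parts 0 [] parts.length

-- ===== PRECONDITION & SPEC =====
-- Pre_ = exactly the inputs where Python A returns: no empty part (part[0] is an IndexError on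
-- every empty string A inspects) and every part starting with 'K' has a later-or-equal part
-- ending in '}' (otherwise the while-loop indexes past the end: IndexError).
def Pre_rejoin_size_parts (parts : List String) : Prop :=
  (∀ p ∈ parts, p ≠ "") ∧
  ∀ i < parts.length, PySem.Str.pyGet? parts[i]! 0 = some 'K' →
    ∃ j < parts.length, i ≤ j ∧ PySem.Str.pyGet? parts[j]! (-1) = some '}'
instance (parts : List String) : Decidable (Pre_rejoin_size_parts parts) := by
  unfold Pre_rejoin_size_parts; infer_instance

def pvWitness_rejoin_size_parts : List String := ["K{a", "b}", "x"]

def Spec_rejoin_size_parts (parts : List String) (out : List String) : Prop := out = rejoin_size_parts_alt parts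
instance (parts : List String) (out : List String) : Decidable (Spec_rejoin_size_parts parts out) := by unfold Spec_rejoin_size_parts; infer_instance

-- ===== CLAIM (what is proved, stated in full; the proofs are below) =====
def Claim_equal_rejoin_size_parts : Prop := ∀ (parts : List String), Dom_rejoin_size_parts parts → Pre_rejoin_size_parts parts → Spec_rejoin_size_parts parts (rejoin_size_parts parts)

-- ===== LEMMAS AND PROOFS =====

-- last character of 'part + "\\" + p' is the last character of p (p nonempty)
lemma pv_last_append (s t : String) (h : t ≠ "") :
    PySem.Str.pyGet? (s ++ "\\" ++ t) (-1) = PySem.Str.pyGet? t (-1) := by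
  have h' : t.toList ≠ [] := by simpa using h
  simp only [PySem.Str.pyGet?_eq, PySem.Chars.pyGet?_eq_listPyGet?, String.toList_append]
  rw [PySem.List.pyGet?_neg_one, PySem.List.pyGet?_neg_one, List.append_assoc,
    List.getLast?_append_of_ne_nil _ (by simp)]
  rw [List.getLast?_append_of_ne_nil _ h']

-- indexing with an in-range Nat cast
lemma pv_get_nat (xs : List String) (k : Nat) (h : k < xs.length) :
    PySem.List.pyGet? xs (k : Int) = some xs[k]! := by
  simp [PySem.List.pyGet?_natCast, List.getElem?_eq_getElem h, List.getElem!_eq_getElem?_getD]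

lemma pv_mem_of_lt (xs : List String) (k : Nat) (h : k < xs.length) : xs[k]! ∈ xs := by
  rw [List.getElem!_eq_getElem?_getD, List.getElem?_eq_getElem h]
  exact List.getElem_mem h

-- a least closing index exists whenever some closing index exists
lemma pv_least (parts : List String) (i j0 : Nat) (h0 : i ≤ j0) (h1 : j0 < parts.length)
    (h2 : PySem.Str.pyGet? parts[j0]! (-1) = some '}') :
    ∃ e, (i ≤ e ∧ e < parts.length ∧ PySem.Str.pyGet? parts[e]! (-1) = some '}') ∧
      ∀ j, i ≤ j → j < e → ¬ PySem.Str.pyGet? parts[j]! (-1) = some '}' := by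
  classical
  have hex : ∃ e, i ≤ e ∧ e < parts.length ∧ PySem.Str.pyGet? parts[e]! (-1) = some '}' :=
    ⟨j0, h0, h1, h2⟩
  refine ⟨Nat.find hex, Nat.find_spec hex, ?_⟩
  intro j hij hje hends
  exact Nat.find_min hex hje ⟨hij, lt_trans hje (Nat.find_spec hex).2.1, hends⟩

-- the inner while-loop of A: lands on the least closing index e, adds exactly (k, e] to skip,
-- and leaves skip unchanged when (k, e] is already contained in it
lemma pv_innerA (parts : List String) :
    ∀ (fuel : Nat) (k e : Nat) (part : String) (skip : PySem.Set Int),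
    (∀ p ∈ parts, p ≠ "") →
    k < parts.length →
    (PySem.Str.pyGet? part (-1) = some '}' ↔ PySem.Str.pyGet? parts[k]! (-1) = some '}') →
    k ≤ e → e < parts.length →
    PySem.Str.pyGet? parts[e]! (-1) = some '}' →
    (∀ j, k ≤ j → j < e → ¬ PySem.Str.pyGet? parts[j]! (-1) = some '}') →
    e - k ≤ fuel →
    (pvAInner parts part (k : Int) skip fuel).2.1 = (e : Int) ∧
    (∀ x : Int, x ∈ (pvAInner parts part (k : Int) skip fuel).2.2 ↔
        x ∈ skip ∨ ((k : Int) < x ∧ x ≤ (e : Int))) ∧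
    ((∀ x : Int, (k : Int) < x → x ≤ (e : Int) → x ∈ skip) →
        (pvAInner parts part (k : Int) skip fuel).2.2 = skip) := by
  intro fuel
  induction fuel with
  | zero =>
    intro k e part skip hne hk hagree hke hen hclose hmin hfuel
    have hek : e = k := by omega
    subst hek
    refine ⟨by simp [pvAInner], ?_, by intro _; simp [pvAInner]⟩
    intro x
    simp only [pvAInner]
    constructor
    · exact Or.inl
    · rintro (h | ⟨h1, h2⟩)
      · exact h
      · omega
  | succ f ih =>
    intro k e part skip hne hk hagree hke hen hclose hmin hfuel
    by_cases hend : PySem.List.pyGet? part.toList (-1) = some '}'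
    · have hpk : PySem.Str.pyGet? parts[k]! (-1) = some '}' := hagree.mp (by simpa using hend)
      have hek : e = k := by
        by_contra hne2
        exact hmin k le_rfl (by omega) hpk
      subst hek
      refine ⟨by simp [pvAInner, hend], ?_, by intro _; simp [pvAInner, hend]⟩
      intro x
      simp only [pvAInner]
      rw [if_neg (not_not_intro (by simpa using hend))]
      constructor
      · exact Or.inl
      · rintro (h | ⟨h1, h2⟩)
        · exact h
        · omega
    · have hpk : ¬ PySem.Str.pyGet? parts[k]! (-1) = some '}' := by
        intro h
        exact hend (by simpa using hagree.mpr h)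
      have hkke : k < e := by
        rcases Nat.eq_or_lt_of_le hke with h | h
        · subst h; exact absurd hclose hpk
        · exact h
      have hk1 : k + 1 < parts.length := by omega
      have hcast : ((k : Int) + 1) = ((k + 1 : Nat) : Int) := by push_cast; ring
      have hget : PySem.List.pyGet? parts ((k : Int) + 1) = some parts[k + 1]! := by
        rw [hcast]; exact pv_get_nat parts (k + 1) hk1
      have hpne : parts[k + 1]! ≠ "" := hne _ (pv_mem_of_lt parts (k + 1) hk1)
      have hagree' : (PySem.Str.pyGet? (part ++ "\\" ++ parts[k + 1]!) (-1) = some '}') ↔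
          (PySem.Str.pyGet? parts[k + 1]! (-1) = some '}') := by
        rw [pv_last_append _ _ hpne]
      have hmin' : ∀ j, k + 1 ≤ j → j < e → ¬ PySem.Str.pyGet? parts[j]! (-1) = some '}' :=
        fun j h1 h2 => hmin j (by omega) h2
      have hstep : pvAInner parts part (k : Int) skip (f + 1)
          = pvAInner parts (part ++ "\\" ++ parts[k + 1]!) ((k + 1 : Nat) : Int)
              (PySem.Set.add skip ((k + 1 : Nat) : Int)) f := by
        rw [← hcast]
        simp [pvAInner, hend, hget]
      obtain ⟨h1, h2, h3⟩ := ih (k + 1) e (part ++ "\\" ++ parts[k + 1]!)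
        (PySem.Set.add skip ((k + 1 : Nat) : Int)) hne hk1 hagree' (by omega) hen hclose hmin'
        (by omega)
      rw [hstep]
      refine ⟨h1, ?_, ?_⟩
      · intro x
        rw [h2 x, PySem.Set.mem_add skip ((k + 1 : Nat) : Int) x]
        constructor
        · rintro ((hx | hx) | ⟨ha, hb⟩)
          · exact Or.inl hx
          · right; push_cast at hx ⊢; omega
          · right; push_cast at ha hb ⊢; omega
        · rintro (hx | ⟨ha, hb⟩)
          · exact Or.inl (Or.inl hx)
          · by_cases hx2 : x = ((k + 1 : Nat) : Int)
            · exact Or.inl (Or.inr hx2)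
            · right; push_cast at ha hb hx2 ⊢; omega
      · intro hsub
        have hmem : ((k + 1 : Nat) : Int) ∈ skip := hsub _ (by push_cast; omega) (by push_cast; omega)
        have hsub' : ∀ x : Int, ((k + 1 : Nat) : Int) < x → x ≤ (e : Int) → x ∈ PySem.Set.add skip ((k + 1 : Nat) : Int) := by
          intro x hx1 hx2
          rw [PySem.Set.mem_add skip ((k + 1 : Nat) : Int) x]
          exact Or.inl (hsub x (by push_cast at hx1 ⊢; omega) hx2)
        rw [h3 hsub', PySem.Set.add_of_mem hmem]

-- the inner loops of the two ports compute the same string and the same final index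
lemma pv_inner_corr (parts : List String) :
    ∀ (fuel : Nat) (part : String) (k : Int) (skip : PySem.Set Int),
    (pvAInner parts part k skip fuel).1 = (pvBGroup parts part k fuel).1 ∧
    (pvAInner parts part k skip fuel).2.1 = (pvBGroup parts part k fuel).2 := by
  intro fuel
  induction fuel with
  | zero => intro part k skip; simp [pvAInner, pvBGroup]
  | succ f ih =>
    intro part k skip
    by_cases hend : PySem.List.pyGet? part.toList (-1) = some '}'
    · simp [pvAInner, pvBGroup, hend]
    · rcases hg : PySem.List.pyGet? parts (k + 1) with _ | p <;>
        simp [pvAInner, pvBGroup, hend, hg, ih]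

-- A's outer loop passes over a fully skipped segment [i, e] without changing its state
lemma pv_pass (parts : List String) :
    ∀ (m : Nat) (i e : Nat) (skip : PySem.Set Int) (result : List String),
    (∀ p ∈ parts, p ≠ "") →
    (∀ j, j < parts.length → PySem.Str.pyGet? parts[j]! 0 = some 'K' →
      ∃ j2, j2 < parts.length ∧ j ≤ j2 ∧ PySem.Str.pyGet? parts[j2]! (-1) = some '}') →
    e < parts.length → PySem.Str.pyGet? parts[e]! (-1) = some '}' →
    i ≤ e + 1 → e + 1 - i ≤ m →
    (∀ j : Nat, i ≤ j → j ≤ e → ((j : Int) ∈ skip)) →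
    (PySem.List.pyRange (i : Int) parts.length 1).foldl (pvAStep parts) (result, skip)
      = (PySem.List.pyRange ((e : Int) + 1) parts.length 1).foldl (pvAStep parts) (result, skip) := by
  intro m
  induction m with
  | zero =>
    intro i e skip result hne hclos he hcl hie hm hsub
    have hieq : i = e + 1 := by omega
    subst hieq
    rw [show ((e : Int) + 1) = ((e + 1 : Nat) : Int) from by push_cast; ring]
  | succ m ih =>
    intro i e skip result hne hclos he hcl hie hm hsub
    by_cases hieq : i = e + 1
    · subst hieq
      rw [show ((e : Int) + 1) = ((e + 1 : Nat) : Int) from by push_cast; ring]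
    · have hile : i ≤ e := by omega
      have hin : i < parts.length := by omega
      have hinZ : (i : Int) < (parts.length : Int) := by exact_mod_cast hin
      rw [PySem.List.pyRange_one_cons hinZ, List.foldl_cons]
      have hgi : PySem.List.pyGet? parts (i : Int) = some parts[i]! := pv_get_nat parts i hin
      have hmemi : (i : Int) ∈ skip := hsub i le_rfl hile
      have hstep : pvAStep parts (result, skip) (i : Int) = (result, skip) := by
        unfold pvAStep
        rw [hgi]
        by_cases hK : PySem.Str.pyGet? parts[i]! 0 = some 'K'
        · obtain ⟨j2, hj2n, hj2ge, hj2b⟩ := hclos i hin hK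
          obtain ⟨e', ⟨he'1, he'2, he'3⟩, hmin'⟩ := pv_least parts i j2 hj2ge hj2n hj2b
          have he'le : e' ≤ e := by
            by_contra hgt
            exact hmin' e hile (by omega) hcl
          have hsub' : ∀ x : Int, (i : Int) < x → x ≤ (e' : Int) → x ∈ skip := by
            intro x hx1 hx2
            have hx0 : x = ((x.toNat : Nat) : Int) := by omega
            rw [hx0]
            exact hsub x.toNat (by omega) (by omega)
          have hid := (pv_innerA parts parts.length i e' parts[i]! skip hne hin Iff.rfl
            he'1 he'2 he'3 hmin' (by omega)).2.2 hsub'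
          simp only [List.getElem!_eq_getElem?_getD, PySem.Str.pyGet?_eq,
            PySem.Chars.pyGet?_eq_listPyGet?, default] at hK hid
          simp [hK, hid, hmemi]
        · simp only [List.getElem!_eq_getElem?_getD, PySem.Str.pyGet?_eq,
            PySem.Chars.pyGet?_eq_listPyGet?, default] at hK
          simp [hK, hmemi]
      rw [hstep, show ((i : Int) + 1) = ((i + 1 : Nat) : Int) from by push_cast; ring]
      exact ih (i + 1) e skip result hne hclos he hcl (by omega) (by omega)
        (fun j h1 h2 => hsub j (by omega) h2)

-- main simulation: with no pending skips at or after i, A's remaining fold is B's loop from i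
lemma pv_main (parts : List String) :
    ∀ (m : Nat) (i : Nat) (skip : PySem.Set Int) (result : List String) (fuel : Nat),
    (∀ p ∈ parts, p ≠ "") →
    (∀ j, j < parts.length → PySem.Str.pyGet? parts[j]! 0 = some 'K' →
      ∃ j2, j2 < parts.length ∧ j ≤ j2 ∧ PySem.Str.pyGet? parts[j2]! (-1) = some '}') →
    parts.length - i ≤ m →
    (∀ x ∈ skip, x < (i : Int)) →
    parts.length - i ≤ fuel →
    ((PySem.List.pyRange (i : Int) parts.length 1).foldl (pvAStep parts) (result, skip)).1
      = pvBLoop parts (i : Int) result fuel := by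
  intro m i skip result fuel
  induction m generalizing i skip result fuel with
  | zero =>
    intro hne hclos hm hlt hfuel
    have hin : parts.length ≤ i := by omega
    rw [PySem.List.pyRange_one_eq_nil (by exact_mod_cast hin)]
    cases fuel with
    | zero => rfl
    | succ f => simp [pvBLoop, show ¬ ((i : Int) < (parts.length : Int)) from by
        exact_mod_cast not_lt.mpr hin]
  | succ m ih =>
    intro hne hclos hm hlt hfuel
    by_cases hin : i < parts.length
    · have hinZ : (i : Int) < (parts.length : Int) := by exact_mod_cast hin
      obtain ⟨f, rfl⟩ : ∃ f, fuel = f + 1 := ⟨fuel - 1, by omega⟩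
      rw [PySem.List.pyRange_one_cons hinZ, List.foldl_cons]
      have hgi : PySem.List.pyGet? parts (i : Int) = some parts[i]! := pv_get_nat parts i hin
      have hnotmem : (i : Int) ∉ skip := fun h => absurd (hlt _ h) (by omega)
      by_cases hK : PySem.Str.pyGet? parts[i]! 0 = some 'K'
      · obtain ⟨j2, hj2n, hj2ge, hj2b⟩ := hclos i hin hK
        obtain ⟨e', ⟨he'1, he'2, he'3⟩, hmin'⟩ := pv_least parts i j2 hj2ge hj2n hj2b
        obtain ⟨hidx, hmem, _⟩ := pv_innerA parts parts.length i e' parts[i]! skip hne hin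
          Iff.rfl he'1 he'2 he'3 hmin' (by omega)
        obtain ⟨hcorr1, hcorr2⟩ := pv_inner_corr parts parts.length parts[i]! (i : Int) skip
        have hnot2 : (i : Int) ∉ (pvAInner parts parts[i]! (i : Int) skip parts.length).2.2 := by
          rw [hmem]
          rintro (h | ⟨h1, h2⟩)
          · exact hnotmem h
          · omega
        simp only [List.getElem!_eq_getElem?_getD, PySem.Str.pyGet?_eq,
          PySem.Chars.pyGet?_eq_listPyGet?, default] at hK hidx hmem hcorr1 hcorr2 hgi hnot2
        have hstep : pvAStep parts (result, skip) (i : Int)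
            = (result ++ [(pvAInner parts (parts[i]?.getD "") (i : Int) skip parts.length).1],
               (pvAInner parts (parts[i]?.getD "") (i : Int) skip parts.length).2.2) := by
          unfold pvAStep
          rw [hgi]
          simp [hK, hnot2]
        rw [hstep]
        have hmemhyp : ∀ j : Nat, i + 1 ≤ j → j ≤ e' →
            ((j : Int) ∈ (pvAInner parts (parts[i]?.getD "") (i : Int) skip parts.length).2.2) := by
          intro j h1 h2
          rw [hmem]
          right
          exact ⟨by omega, by omega⟩
        have hpass := pv_pass parts (e' + 1 - (i + 1)) (i + 1) e'
          (pvAInner parts (parts[i]?.getD "") (i : Int) skip parts.length).2.2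
          (result ++ [(pvAInner parts (parts[i]?.getD "") (i : Int) skip parts.length).1])
          hne hclos he'2 he'3 (by omega) (by omega) hmemhyp
        rw [show ((i : Int) + 1) = ((i + 1 : Nat) : Int) from by push_cast; ring, hpass,
          show ((e' : Int) + 1) = ((e' + 1 : Nat) : Int) from by push_cast; ring]
        have hlt' : ∀ x ∈ (pvAInner parts (parts[i]?.getD "") (i : Int) skip parts.length).2.2,
            x < ((e' + 1 : Nat) : Int) := by
          intro x hx
          rw [hmem] at hx
          rcases hx with h | ⟨h1, h2⟩
          · have := hlt x h
            push_cast at this ⊢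
            omega
          · push_cast at h2 ⊢
            omega
        rw [ih (e' + 1) _ _ f hne hclos (by omega) hlt' (by omega)]
        -- B side
        have hB2 : (pvBGroup parts (parts[i]?.getD "") (i : Int) parts.length).2 = (e' : Int) := by
          rw [← hcorr2, hidx]
        have hK2 : PySem.Str.pyGet? (parts[i]?.getD "") 0 = some 'K' := by simpa using hK
        simp only [pvBLoop, if_pos hinZ, hgi, hK2, if_pos]
        rw [hB2, hcorr1, show ((e' : Int) + 1) = ((e' + 1 : Nat) : Int) from by push_cast; ring]
      · simp only [List.getElem!_eq_getElem?_getD, PySem.Str.pyGet?_eq,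
          PySem.Chars.pyGet?_eq_listPyGet?, default] at hK hgi
        have hstep : pvAStep parts (result, skip) (i : Int)
            = (result ++ [parts[i]?.getD ""], skip) := by
          unfold pvAStep
          rw [hgi]
          simp [hK, hnotmem]
        rw [hstep, show ((i : Int) + 1) = ((i + 1 : Nat) : Int) from by push_cast; ring]
        rw [ih (i + 1) _ _ f hne hclos (by omega)
          (by intro x hx; have := hlt x hx; push_cast at this ⊢; omega) (by omega)]
        have hK2 : ¬ PySem.Str.pyGet? (parts[i]?.getD "") 0 = some 'K' := by simpa using hK
        simp only [pvBLoop, if_pos hinZ, hgi]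
        rw [if_neg hK2, show ((i : Int) + 1) = ((i + 1 : Nat) : Int) from by push_cast; ring]
    · have hinge : parts.length ≤ i := by omega
      rw [PySem.List.pyRange_one_eq_nil (by exact_mod_cast hinge)]
      cases fuel with
      | zero => rfl
      | succ f => simp [pvBLoop, show ¬ ((i : Int) < (parts.length : Int)) from by
          exact_mod_cast not_lt.mpr hinge]

-- ===== VERDICT (by name: the statement is the Claim_ definition above) =====
theorem rejoin_size_parts_spec : Claim_equal_rejoin_size_parts := by
  intro parts _ hpre
  unfold Spec_rejoin_size_parts rejoin_size_parts rejoin_size_parts_alt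
  obtain ⟨hne, hclos⟩ := hpre
  have hclos' : ∀ j, j < parts.length → PySem.Str.pyGet? parts[j]! 0 = some 'K' →
      ∃ j2, j2 < parts.length ∧ j ≤ j2 ∧ PySem.Str.pyGet? parts[j2]! (-1) = some '}' := by
    intro j hj hK
    obtain ⟨j2, hj2, hle, hb⟩ := hclos j hj hK
    exact ⟨j2, hj2, hle, hb⟩
  have := pv_main parts parts.length 0 PySem.Set.empty [] parts.length hne hclos'
    (by omega) (by intro x hx; simp [PySem.Set.empty] at hx) (by omega)
  simpa using this
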